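-- pv_equiv track=rewrite | github.com/echefcy/dc20 | DC_game/gameRoom.py | XPattern
-- ===== SOURCE A (Python) =====
-- ROOM_WIDTH = 1024
--
-- ROOM_HEIGHT = 1024
--
-- WALL_SIZE = 64
--
-- def XPattern(size=10):
--     mapSizeRow = ROOM_HEIGHT//WALL_SIZE
--     mapSizeCol = ROOM_WIDTH//WALL_SIZE
--     ret = [[0 for i in range(mapSizeCol)] for j in range(mapSizeRow)]
--     for row in range((mapSizeRow-size)//2, (mapSizeRow-size)//2+size):
--         for col in range((mapSizeCol-size)//2, (mapSizeCol-size)//2+size):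
--             if row - col == 0:
--                 ret[row][col] = 1
--             elif row + col == mapSizeRow - 1:
--                 ret[row][col] = 1
--     return ret
-- ===== SOURCE B (Python) =====
-- ROOM_WIDTH = 1024
--
-- ROOM_HEIGHT = 1024
--
-- WALL_SIZE = 64
--
-- def XPattern(size=10):
--     n = ROOM_HEIGHT // WALL_SIZE          # 16 rows (== ROOM_WIDTH // WALL_SIZE columns)
--     ret = [[0] * n for _ in range(n)]
--     r0 = (n - size) // 2
--     # touch only the ~2*size diagonal cells of the centered square instead of scanning size*size cells
--     for row in range(r0, r0 + size):
--         if 0 <= row < n: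
--             ret[row][row] = 1             # main diagonal: col == row is always inside the square
--             col = n - 1 - row
--             if r0 <= col < r0 + size:     # anti-diagonal cell, only if inside the square
--                 ret[row][col] = 1
--     return ret
-- ===== Notes on version B (the rewrite author's own statement) =====
-- stated objective: faster
-- what changed: B computes the two diagonal cells of each row directly in a single loop over the size rows (with bounds checks) instead of scanning the whole size x size centered square with two predicates.
import Mathlib
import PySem

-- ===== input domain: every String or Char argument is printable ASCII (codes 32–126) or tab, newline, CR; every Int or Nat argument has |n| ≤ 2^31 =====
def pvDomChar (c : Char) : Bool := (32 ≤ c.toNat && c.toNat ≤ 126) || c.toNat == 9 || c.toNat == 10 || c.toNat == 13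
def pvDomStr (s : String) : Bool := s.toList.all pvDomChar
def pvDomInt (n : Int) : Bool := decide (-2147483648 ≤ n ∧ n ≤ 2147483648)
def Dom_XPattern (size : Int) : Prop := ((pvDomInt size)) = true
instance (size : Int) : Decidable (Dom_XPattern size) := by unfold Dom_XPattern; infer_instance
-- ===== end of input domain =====

-- B sets the ~2*size diagonal cells of the centered square directly in one loop over the rows
-- instead of scanning the whole size x size square with two predicates (asymptotically faster).

-- ===== PORT A =====
def XPattern (size : Int) : List (List Int) :=
  let mapSizeRow : Int := PySem.Int.floordiv 1024 64
  let mapSizeCol : Int := PySem.Int.floordiv 1024 64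
  let ret : List (List Int) :=
    (PySem.List.pyRange 0 mapSizeRow 1).map (fun _ =>
      (PySem.List.pyRange 0 mapSizeCol 1).map (fun _ => (0 : Int)))
  (PySem.List.pyRange (PySem.Int.floordiv (mapSizeRow - size) 2)
      (PySem.Int.floordiv (mapSizeRow - size) 2 + size) 1).foldl (fun ret row =>
    (PySem.List.pyRange (PySem.Int.floordiv (mapSizeCol - size) 2)
        (PySem.Int.floordiv (mapSizeCol - size) 2 + size) 1).foldl (fun ret col =>
      if row - col == 0 then
        -- ret[row][col] = 1 (Python negative-index wraparound; in range under Pre_)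
        PySem.List.pySetD ret row (PySem.List.pySetD (PySem.List.pyGetD ret row []) col 1)
      else if row + col == mapSizeRow - 1 then
        PySem.List.pySetD ret row (PySem.List.pySetD (PySem.List.pyGetD ret row []) col 1)
      else ret) ret) ret

-- ===== PORT B =====
def XPattern_alt (size : Int) : List (List Int) :=
  let n : Int := PySem.Int.floordiv 1024 64
  let ret : List (List Int) := List.replicate n.toNat (List.replicate n.toNat (0 : Int))
  let r0 : Int := PySem.Int.floordiv (n - size) 2
  (PySem.List.pyRange r0 (r0 + size) 1).foldl (fun ret row =>
    if 0 ≤ row ∧ row < n then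
      -- guarded 0 ≤ row < n, so plain in-range assignment is exact here
      let ret := PySem.List.pySetD ret row (PySem.List.pySetD (PySem.List.pyGetD ret row []) row 1)
      let col := n - 1 - row
      if r0 ≤ col ∧ col < r0 + size then
        PySem.List.pySetD ret row (PySem.List.pySetD (PySem.List.pyGetD ret row []) col 1)
      else ret
    else ret) ret

-- ===== PRECONDITION & SPEC =====
-- Pre_ excludes exactly size ≥ 18, where A raises IndexError (a diagonal cell of the loop
-- reaches row 16 of the 16-row grid).
def Pre_XPattern (size : Int) : Prop := size ≤ 17
instance (size : Int) : Decidable (Pre_XPattern size) := by unfold Pre_XPattern; infer_instance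
def pvWitness_XPattern : Int := (10)

def Spec_XPattern (size : Int) (out : List (List Int)) : Prop := out = XPattern_alt size
instance (size : Int) (out : List (List Int)) : Decidable (Spec_XPattern size out) := by unfold Spec_XPattern; infer_instance

-- ===== CLAIM (what is proved, stated in full; the proofs are below) =====
def Claim_equal_XPattern : Prop := ∀ (size : Int), Dom_XPattern size → Pre_XPattern size → Spec_XPattern size (XPattern size)

-- ===== LEMMAS AND PROOFS =====

-- For size ≤ 0 both loops are over an empty range and both return the all-zero 16×16 grid.
theorem XPattern_nonpos (size : Int) (h : size ≤ 0) : XPattern size = XPattern_alt size := by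
  simp only [XPattern, XPattern_alt]
  rw [show PySem.Int.floordiv 1024 64 = 16 from by decide]
  rw [PySem.List.pyRange_one_eq_nil (a := PySem.Int.floordiv (16 - size) 2) (by omega)]
  simp only [List.foldl_nil]
  decide

-- ===== VERDICT (by name: the statement is the Claim_ definition above) =====
set_option maxRecDepth 40000 in
theorem XPattern_spec : Claim_equal_XPattern := by
  intro size _ hpre
  unfold Spec_XPattern
  by_cases h : size ≤ 0
  · exact XPattern_nonpos size h
  · have h1 : 1 ≤ size := by omega
    have h2 : size ≤ 17 := hpre
    interval_cases size <;> decide
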